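-- pv_equiv track=rewrite | github.com/SGVp15/ite_split_excel_for_portal | main.py | get_range_header
-- ===== SOURCE A (Python) =====
-- def get_range_header(data) -> dict:
--     result = {}
--     key = None
--     for index, value in enumerate(data):
--         if value is not None:
--             key = value
--         if value is not None or key is not None:
--             result.setdefault(key, []).append(index)
--     return result
-- ===== SOURCE B (Python) =====
-- def get_range_header(data) -> dict:
--     # Pass 1: forward-fill the active key for every index.
--     keys = []
--     k = None
--     for value in data:
--         if value is not None:
--             k = value
--         keys.append(k)
--     # Pass 2: group indices by their filled key, skipping still-None slots.
--     result = {}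
--     for index, k in enumerate(keys):
--         if k is not None:
--             result.setdefault(k, []).append(index)
--     return result
-- ===== Notes on version B (the rewrite author's own statement) =====
-- stated objective: alternative
-- what changed: B replaces A's single combined pass (dict and carried key updated together under a two-branch guard) with a build-table-then-group decomposition: first forward-fill a keys table, then group indices by non-None table entries.
import Mathlib
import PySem

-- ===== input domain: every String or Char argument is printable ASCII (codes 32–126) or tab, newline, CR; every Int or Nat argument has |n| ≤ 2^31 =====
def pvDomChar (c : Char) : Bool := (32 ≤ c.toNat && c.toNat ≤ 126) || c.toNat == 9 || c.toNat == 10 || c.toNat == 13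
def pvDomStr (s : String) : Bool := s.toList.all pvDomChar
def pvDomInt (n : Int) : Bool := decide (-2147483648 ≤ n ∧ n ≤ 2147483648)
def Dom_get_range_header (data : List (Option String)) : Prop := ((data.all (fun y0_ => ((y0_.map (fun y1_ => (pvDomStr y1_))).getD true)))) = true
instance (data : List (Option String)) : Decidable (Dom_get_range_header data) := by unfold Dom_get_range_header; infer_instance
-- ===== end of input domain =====

-- B replaces A's single combined pass with a forward-fill-a-keys-table pass followed by a
-- separate grouping pass over the table (objective: alternative decomposition, same cost).

-- ===== PORT A =====
-- single loop over enumerate(data), carrying (result, key); the index is carried as an Int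
def pvALoop (rest : List (Option String)) (index : Int)
    (result : PySem.Dict String (List Int)) (key : Option String) :
    PySem.Dict String (List Int) :=
  match rest with
  | [] => result
  | value :: rest =>
    -- if value is not None: key = value
    let key := if value.isSome then value else key
    -- if value is not None or key is not None: result.setdefault(key, []).append(index)
    let result :=
      if value.isSome || key.isSome then
        match key with
        | some k => result.modify k [] (· ++ [index])
        | none => result   -- unreachable: the guard forces key to be non-None here
      else result
    pvALoop rest (index + 1) result key

def get_range_header (data : List (Option String)) : List (String × List Int) :=
  (pvALoop data 0 PySem.Dict.empty none).items

-- ===== PORT B =====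
-- pass 1: keys[i] = last non-None value at or before i (forward fill, start None)
def pvFfill (k : Option String) (rest : List (Option String)) : List (Option String) :=
  match rest with
  | [] => []
  | value :: rest =>
    let k := if value.isSome then value else k
    k :: pvFfill k rest

-- pass 2: for index, k in enumerate(keys): if k is not None: result.setdefault(k, []).append(index)
def pvGroup (keys : List (Option String)) (index : Int)
    (result : PySem.Dict String (List Int)) : PySem.Dict String (List Int) :=
  match keys with
  | [] => result
  | k :: keys =>
    let result :=
      match k with
      | some s => result.modify s [] (· ++ [index])
      | none => result
    pvGroup keys (index + 1) result

def get_range_header_alt (data : List (Option String)) : List (String × List Int) :=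
  (pvGroup (pvFfill none data) 0 PySem.Dict.empty).items

-- ===== PRECONDITION & SPEC =====
def Spec_get_range_header (data : List (Option String)) (out : List (String × List Int)) : Prop := out = get_range_header_alt data
instance (data : List (Option String)) (out : List (String × List Int)) : Decidable (Spec_get_range_header data out) := by unfold Spec_get_range_header; infer_instance

-- ===== CLAIM (what is proved, stated in full; the proofs are below) =====
def Claim_equal_get_range_header : Prop := ∀ (data : List (Option String)), Dom_get_range_header data → Spec_get_range_header data (get_range_header data)

-- ===== LEMMAS AND PROOFS =====
-- A's combined loop from any state equals grouping the forward-filled tail from the same state.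
theorem pvALoop_eq_group (rest : List (Option String)) :
    ∀ (index : Int) (result : PySem.Dict String (List Int)) (key : Option String),
    pvALoop rest index result key = pvGroup (pvFfill key rest) index result := by
  induction rest with
  | nil => intro index result key; rfl
  | cons value rest ih =>
    intro index result key
    cases value <;> cases key <;>
      simp [pvALoop, pvFfill, pvGroup, ih]

-- ===== VERDICT (by name: the statement is the Claim_ definition above) =====
theorem get_range_header_spec : Claim_equal_get_range_header := by
  intro data _
  unfold Spec_get_range_header get_range_header get_range_header_alt
  rw [pvALoop_eq_group]
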